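-- pv_equiv track=rewrite | github.com/pypi-data/pypi-mirror-349 | packages/LHCbWebDIRAC/lhcbwebdirac-7.0.0a7.tar.gz/lhcbwebdirac-7.0.0a7/src/LHCbWebDIRAC/WebApp/handler/BookkeepingBrowserHandler.py | __niceNumbers
-- ===== SOURCE A (Python) =====
-- def __niceNumbers(number):
--     strList = list(str(number))
--     newList = [strList[max(0, i - 3) : i] for i in range(len(strList), 0, -3)]
--     newList.reverse()
--     finalList = []
--     for i in newList:
--         finalList.append(str("".join(i)))
--     finalList = " ".join(map(str, finalList))
--     return finalList
-- ===== SOURCE B (Python) =====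
-- def __niceNumbers(number):
--     s = str(number)
--     n = len(s)
--     parts = []
--     for idx, ch in enumerate(s):
--         if idx > 0 and (n - idx) % 3 == 0:
--             parts.append(' ')
--         parts.append(ch)
--     return ''.join(parts)
-- ===== Notes on version B (the rewrite author's own statement) =====
-- stated objective: simpler
-- what changed: Replaces A's build-of-reversed-slice-chunks (countdown range, list of slices, reverse, per-chunk join then space-join) by a single left-to-right enumerate pass over str(number) that emits a separating space before each character whose distance from the string's end is a positive multiple of three.
import Mathlib
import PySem

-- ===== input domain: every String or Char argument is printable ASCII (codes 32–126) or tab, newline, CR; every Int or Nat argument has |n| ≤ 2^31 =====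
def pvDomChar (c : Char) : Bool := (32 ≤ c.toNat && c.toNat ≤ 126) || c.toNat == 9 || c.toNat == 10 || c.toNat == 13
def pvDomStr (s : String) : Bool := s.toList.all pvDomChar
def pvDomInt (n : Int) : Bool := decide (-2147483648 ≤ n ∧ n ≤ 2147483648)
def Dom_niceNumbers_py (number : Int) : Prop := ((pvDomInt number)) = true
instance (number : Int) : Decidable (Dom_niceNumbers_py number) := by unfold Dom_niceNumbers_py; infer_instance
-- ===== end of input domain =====

-- B replaces A's reversed-slice-chunk construction by a single left-to-right pass
-- inserting a space at each boundary position; objective: simpler.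

-- ===== PORT A =====
-- literal port of A: list(str(number)); slices at i for i in range(len,0,-3); reverse;
-- per-chunk "".join; final " ".join(map(str, …))
def niceNumbers_py (number : Int) : String :=
  let strList : List Char := PySem.Int.toChars number
  let newList : List (List Char) :=
    (PySem.List.pyRange (strList.length : Int) 0 (-3)).map
      (fun i => PySem.List.slice strList (some (max 0 (i - 3))) (some i))
  let newList := newList.reverse
  let finalList : List (List Char) :=
    newList.foldl (fun acc i => acc ++ [PySem.Chars.join [] (i.map (fun c => [c]))]) []
  String.ofList (PySem.Chars.join [' '] (finalList.map (fun s => s)))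

-- ===== PORT B =====
-- literal port of B: one pass over enumerate(str(number)); space before idx when
-- idx > 0 and (n - idx) % 3 == 0; ''.join of the accumulated characters
def niceNumbers_py_alt (number : Int) : String :=
  let s : List Char := PySem.Int.toChars number
  let n : Int := (s.length : Int)
  let parts : List Char :=
    (PySem.List.enumerate s 0).foldl
      (fun acc p =>
        let acc := if 0 < p.1 ∧ PySem.Int.mod (n - p.1) 3 = 0 then acc ++ [' '] else acc
        acc ++ [p.2]) []
  String.ofList parts

-- ===== PRECONDITION & SPEC =====
def Spec_niceNumbers_py (number : Int) (out : String) : Prop := out = niceNumbers_py_alt number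
instance (number : Int) (out : String) : Decidable (Spec_niceNumbers_py number out) := by unfold Spec_niceNumbers_py; infer_instance

-- ===== CLAIM (what is proved, stated in full; the proofs are below) =====
def Claim_equal_niceNumbers_py : Prop := ∀ (number : Int), Dom_niceNumbers_py number → Spec_niceNumbers_py number (niceNumbers_py number)

-- ===== LEMMAS AND PROOFS =====

-- A's result as a list of chars: reversed chunk list joined with a space
def pvChunksA (l : List Char) : List (List Char) :=
  ((PySem.List.pyRange (l.length : Int) 0 (-3)).map
      (fun i => PySem.List.slice l (some (max 0 (i - 3))) (some i))).reverse

def pvAlist (l : List Char) : List Char := PySem.Chars.join [' '] (pvChunksA l)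

-- B's result as a list of chars, with the full length passed explicitly
def pvBlist (l : List Char) (n : Int) : List Char :=
  (PySem.List.enumerate l 0).flatMap
    (fun p => (if 0 < p.1 ∧ PySem.Int.mod (n - p.1) 3 = 0 then [' '] else []) ++ [p.2])

theorem pvRange_base (n : Nat) (h0 : 0 < n) (h3 : n ≤ 3) :
    PySem.List.pyRange (n : Int) 0 (-3) = [(n : Int)] := by
  unfold PySem.List.pyRange
  simp only [neg_neg, sub_zero]
  have hc : (((n : Int) + 3 - 1) / 3).toNat = 1 := by omega
  simp [hc, h0, List.range_one]

theorem pvRange_step (n : Nat) (h : 3 < n) :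
    PySem.List.pyRange (n : Int) 0 (-3) = (n : Int) :: PySem.List.pyRange ((n : Int) - 3) 0 (-3) := by
  unfold PySem.List.pyRange
  simp only [neg_neg, sub_zero]
  have h1 : (0:Int) < (n:Int) := by omega
  have h2 : (0:Int) < (n:Int) - 3 := by omega
  have hc : (((n : Int) + 3 - 1) / 3).toNat = (((n : Int) - 3 + 3 - 1) / 3).toNat + 1 := by omega
  simp only [if_neg (by norm_num : ¬ (-3:Int) = 0), if_neg (by norm_num : ¬ (0:Int) < -3),
    if_pos h1, if_pos h2]
  rw [hc, List.range_succ_eq_map]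
  simp only [List.map_cons, List.map_map, Function.comp_def, Nat.cast_zero, mul_zero, add_zero,
    Nat.cast_succ]
  congr 1
  apply List.map_congr_left
  intro k _
  ring

theorem pvRange_ne (n : Nat) (h : 0 < n) : PySem.List.pyRange (n : Int) 0 (-3) ≠ [] := by
  by_cases h3 : n ≤ 3
  · rw [pvRange_base n h h3]; simp
  · rw [pvRange_step n (by omega)]; simp

theorem pvMem_range (n : Nat) (i : Int) (hi : i ∈ PySem.List.pyRange (n : Int) 0 (-3)) :
    0 < i ∧ i ≤ n := by
  unfold PySem.List.pyRange at hi
  simp only [neg_neg, sub_zero] at hi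
  simp at hi
  split_ifs at hi with h1
  · obtain ⟨k, hk, rfl⟩ := hi
    omega
  · simp at hi

theorem pvSlice_prefix (l : List Char) (m : Nat) (i : Int) (h0 : 0 < i) (hm : i ≤ m) :
    PySem.List.slice l (some (max 0 (i - 3))) (some i)
      = PySem.List.slice (l.take m) (some (max 0 (i - 3))) (some i) := by
  have ha : (0:Int) ≤ max 0 (i - 3) := le_max_left _ _
  have hb : (0:Int) ≤ i := le_of_lt h0
  rw [PySem.List.slice_toNat _ ha hb, PySem.List.slice_toNat _ ha hb]
  rw [List.drop_take, List.take_take]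
  congr 1
  omega

theorem pvJoin_append_singleton (sep c : List Char) (xs : List (List Char)) (h : xs ≠ []) :
    PySem.Chars.join sep (xs ++ [c]) = PySem.Chars.join sep xs ++ sep ++ c := by
  induction xs with
  | nil => simp at h
  | cons a t ih =>
    cases t with
    | nil => simp [PySem.Chars.join_singleton, PySem.Chars.join_cons_cons]
    | cons b t' =>
      have hih := ih (by simp)
      simp only [List.cons_append] at hih ⊢
      rw [PySem.Chars.join_cons_cons, hih, PySem.Chars.join_cons_cons]
      simp

theorem pvMod_shift (x : Int) : PySem.Int.mod x 3 = PySem.Int.mod (x - 3) 3 := by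
  simp [PySem.Int.mod, Int.fmod_eq_emod]

theorem pvMod_ne (x : Int) (h1 : 0 < x) (h2 : x < 3) : PySem.Int.mod x 3 ≠ 0 := by
  simp [PySem.Int.mod, Int.fmod_eq_emod]; omega

theorem pvBlist_shift (l : List Char) (n : Int) : pvBlist l n = pvBlist l (n - 3) := by
  unfold pvBlist
  apply List.flatMap_congr
  intro p _
  rw [pvMod_shift (n - p.1)]
  ring_nf

theorem pvFlatMap_snd (L : List (Int × Char)) :
    L.flatMap (fun p => [p.2]) = L.map (fun p => p.2) := by
  induction L with
  | nil => rfl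
  | cons a t ih => simp [List.flatMap_cons, ih]

theorem pvBlist_small (l : List Char) (n : Nat) (hl : l.length = n) (h3 : n ≤ 3) :
    pvBlist l (n : Int) = l := by
  unfold pvBlist
  have hcg : ∀ p ∈ PySem.List.enumerate l 0,
      ((if 0 < p.1 ∧ PySem.Int.mod ((n:Int) - p.1) 3 = 0 then [' '] else []) ++ [p.2]) = [p.2] := by
    intro p hp
    rw [PySem.List.mem_enumerate_iff] at hp
    obtain ⟨k, hk, rfl⟩ := hp
    simp only [zero_add]
    rw [if_neg]
    · simp
    · rintro ⟨hpos, hmod⟩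
      exact pvMod_ne _ (by omega) (by simp at hpos; omega) hmod
  rw [List.flatMap_congr hcg, pvFlatMap_snd]
  exact PySem.List.map_snd_enumerate l 0

theorem pvBlist_step (l1 : List Char) (a b c : Char) (n : Nat) (hn : l1.length + 3 = n)
    (hpos : 0 < l1.length) :
    pvBlist (l1 ++ [a, b, c]) (n : Int) = pvBlist l1 (n : Int) ++ [' '] ++ [a, b, c] := by
  unfold pvBlist
  rw [PySem.List.enumerate_append, List.flatMap_append]
  have hsecond :
      (PySem.List.enumerate [a, b, c] (0 + (l1.length : Int))).flatMap
        (fun p => (if 0 < p.1 ∧ PySem.Int.mod ((n:Int) - p.1) 3 = 0 then [' '] else []) ++ [p.2])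
        = [' ', a, b, c] := by
    rw [PySem.List.enumerate_cons, PySem.List.enumerate_cons, PySem.List.enumerate_cons,
      PySem.List.enumerate_nil]
    have e1 : (n:Int) - (0 + (l1.length:Int)) = 3 := by omega
    have e2 : (n:Int) - (0 + (l1.length:Int) + 1) = 2 := by omega
    have e3 : (n:Int) - (0 + (l1.length:Int) + 1 + 1) = 1 := by omega
    simp only [List.flatMap_cons, List.flatMap_nil]
    rw [e1, e2, e3]
    rw [if_pos ⟨by omega, by decide⟩, if_neg (by rintro ⟨_, h⟩; revert h; decide),
      if_neg (by rintro ⟨_, h⟩; revert h; decide)]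
    simp
  rw [hsecond]
  simp [List.append_assoc]

theorem pvAlist_small (l : List Char) (n : Nat) (hl : l.length = n) (h0 : 0 < n) (h3 : n ≤ 3) :
    pvAlist l = l := by
  unfold pvAlist pvChunksA
  rw [hl, pvRange_base n h0 h3]
  have hmax : max 0 ((n:Int) - 3) = 0 := by omega
  rw [List.map_singleton, hmax,
    PySem.List.slice_toNat _ le_rfl (by omega : (0:Int) ≤ (n:Int))]
  simp only [Int.toNat_natCast, Int.toNat_zero, Nat.sub_zero, List.drop_zero, List.reverse_singleton]
  rw [PySem.Chars.join_singleton]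
  rw [← hl, List.take_length]

theorem pvAlist_step (l : List Char) (n : Nat) (hl : l.length = n) (h : 3 < n) :
    pvAlist l = pvAlist (l.take (n - 3)) ++ [' '] ++ l.drop (n - 3) := by
  unfold pvAlist pvChunksA
  rw [hl, pvRange_step n h]
  have hcast : (n:Int) - 3 = ((n - 3 : Nat) : Int) := by omega
  have hlast : PySem.List.slice l (some (max 0 ((n:Int) - 3))) (some (n:Int)) = l.drop (n - 3) := by
    have hmax : max 0 ((n:Int) - 3) = (n:Int) - 3 := by omega
    rw [hmax, PySem.List.slice_toNat _ (by omega) (by omega)]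
    have h1 : (n:Int).toNat - ((n:Int) - 3).toNat = 3 := by omega
    have h2 : ((n:Int) - 3).toNat = n - 3 := by omega
    rw [h1, h2]
    apply List.take_of_length_le
    simp [hl]
    omega
  have htail : (PySem.List.pyRange ((n:Int) - 3) 0 (-3)).map
        (fun i => PySem.List.slice l (some (max 0 (i - 3))) (some i))
      = (PySem.List.pyRange (((l.take (n - 3)).length : Int)) 0 (-3)).map
        (fun i => PySem.List.slice (l.take (n - 3)) (some (max 0 (i - 3))) (some i)) := by
    have hlen : (l.take (n - 3)).length = n - 3 := by simp [hl]
    rw [hlen, ← hcast]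
    apply List.map_congr_left
    intro i hi
    rw [hcast] at hi
    obtain ⟨hi1, hi2⟩ := pvMem_range (n - 3) i hi
    exact pvSlice_prefix l (n - 3) i hi1 (by exact_mod_cast hi2)
  rw [List.map_cons, List.reverse_cons, htail, hlast]
  have hne : (List.map (fun i => PySem.List.slice (List.take (n - 3) l) (some (max 0 (i - 3))) (some i))
      (PySem.List.pyRange (((l.take (n - 3)).length : Nat) : Int) 0 (-3))).reverse ≠ [] := by
    simp only [ne_eq, List.reverse_eq_nil_iff, List.map_eq_nil_iff]
    have hlen : (l.take (n - 3)).length = n - 3 := by simp [hl]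
    rw [hlen]
    exact pvRange_ne (n - 3) (by omega)
  rw [pvJoin_append_singleton _ _ _ hne]

theorem pvCore_eq (n : Nat) : ∀ (l : List Char), l.length = n → pvAlist l = pvBlist l (n : Int) := by
  induction n using Nat.strong_induction_on with
  | _ n ih =>
    intro l hl
    rcases Nat.eq_zero_or_pos n with h0 | h0
    · subst h0
      have : l = [] := List.length_eq_zero_iff.mp hl
      subst this
      simp [pvAlist, pvChunksA, pvBlist, PySem.List.enumerate_nil]
      unfold PySem.List.pyRange
      simp [PySem.Chars.join_nil]
    · by_cases h3 : n ≤ 3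
      · rw [pvAlist_small l n hl h0 h3, pvBlist_small l n hl h3]
      · replace h3 : 3 < n := by omega
        have hsplit : l = l.take (n - 3) ++ l.drop (n - 3) := (List.take_append_drop _ _).symm
        have hlen2 : (l.drop (n - 3)).length = 3 := by simp [hl]; omega
        obtain ⟨a, b, c, habc⟩ := List.length_eq_three.mp hlen2
        have hlen1 : (l.take (n - 3)).length = n - 3 := by simp [hl]
        have hrec := ih (n - 3) (by omega) (l.take (n - 3)) hlen1
        rw [pvAlist_step l n hl h3, hrec]
        conv_rhs => rw [hsplit, habc]
        rw [pvBlist_step (l.take (n - 3)) a b c n (by omega) (by omega)]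
        rw [habc]
        congr 2
        rw [pvBlist_shift (l.take (n - 3)) ((n : Nat) : Int)]
        congr 1
        omega

theorem pvWrap (xs : List (List Char)) :
    (xs.flatMap (fun i => [PySem.Chars.join [] (i.map (fun c => [c]))])).map (fun s => s) = xs := by
  rw [List.map_id']
  rw [List.flatMap_congr (fun i _ => by rw [PySem.Chars.join_nil_singletons])]
  exact List.flatMap_singleton' xs

theorem pvStep_eq (n : Int) :
    (fun (acc : List Char) (p : Int × Char) =>
       (if 0 < p.1 ∧ PySem.Int.mod (n - p.1) 3 = 0 then acc ++ [' '] else acc) ++ [p.2])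
    = fun acc p => acc ++ ((if 0 < p.1 ∧ PySem.Int.mod (n - p.1) 3 = 0 then [' '] else []) ++ [p.2]) := by
  funext acc p
  split_ifs <;> simp

theorem pvA_as_core (number : Int) :
    niceNumbers_py number = String.ofList (pvAlist (PySem.Int.toChars number)) := by
  simp only [niceNumbers_py]
  rw [PySem.List.foldl_append_eq_flatMap]
  simp only [List.nil_append]
  unfold pvAlist pvChunksA
  congr 1
  congr 1
  exact pvWrap _

theorem pvB_as_core (number : Int) :
    niceNumbers_py_alt number
      = String.ofList (pvBlist (PySem.Int.toChars number)
          (((PySem.Int.toChars number).length : Nat) : Int)) := by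
  simp only [niceNumbers_py_alt]
  rw [pvStep_eq, PySem.List.foldl_append_eq_flatMap]
  simp only [List.nil_append]
  rfl

theorem niceNumbers_py_eq (number : Int) :
    niceNumbers_py number = niceNumbers_py_alt number := by
  rw [pvA_as_core, pvB_as_core]
  congr 1
  exact pvCore_eq (PySem.Int.toChars number).length _ rfl

-- ===== VERDICT (by name: the statement is the Claim_ definition above) =====
theorem niceNumbers_py_spec : Claim_equal_niceNumbers_py := by
  intro number _
  exact niceNumbers_py_eq number
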